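-- pv_equiv track=rewrite | github.com/or-m-or/KT-AIVLE-School-5th_Codingmasters | example/round2/Advanced/Q8743_쌍둥이의대결/A8743.py | solution
-- ===== SOURCE A (Python) =====
-- def solution(n, sequence, m):
--     scores = []
--
--     for i in range(n):
--         num = sequence[i] % m
--         scores.append(num)
--         for j in range(i + 1, n):
--             num = (num * sequence[j]) % m
--             scores.append(num)
--     scores.sort(reverse=True)
--
--     answer = sum(scores[0::2]) - sum(scores[1::2])
--     return answer
-- ===== SOURCE B (Python) =====
-- def solution(n, sequence, m):
--     scores = []
--     for i in range(n):
--         num = sequence[i] % m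
--         scores.append(num)
--         for j in range(i + 1, n):
--             num = (num * sequence[j]) % m
--             scores.append(num)
--     counts = {}
--     for v in scores:
--         counts[v] = counts.get(v, 0) + 1
--     answer = 0
--     flip = False
--     for v in sorted(counts, reverse=True):
--         if counts[v] % 2 == 1:
--             answer += -v if flip else v
--             flip = not flip
--     return answer
-- ===== Notes on version B (the rewrite author's own statement) =====
-- stated objective: alternative
-- what changed: Instead of sorting all n(n+1)/2 subarray-product residues in reverse and summing two stride-2 slices, B buckets the residues in a dict of counts and computes the alternating sum by walking the distinct values in descending order, using the parity of each bucket's count (even-count buckets cancel).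
import Mathlib
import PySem

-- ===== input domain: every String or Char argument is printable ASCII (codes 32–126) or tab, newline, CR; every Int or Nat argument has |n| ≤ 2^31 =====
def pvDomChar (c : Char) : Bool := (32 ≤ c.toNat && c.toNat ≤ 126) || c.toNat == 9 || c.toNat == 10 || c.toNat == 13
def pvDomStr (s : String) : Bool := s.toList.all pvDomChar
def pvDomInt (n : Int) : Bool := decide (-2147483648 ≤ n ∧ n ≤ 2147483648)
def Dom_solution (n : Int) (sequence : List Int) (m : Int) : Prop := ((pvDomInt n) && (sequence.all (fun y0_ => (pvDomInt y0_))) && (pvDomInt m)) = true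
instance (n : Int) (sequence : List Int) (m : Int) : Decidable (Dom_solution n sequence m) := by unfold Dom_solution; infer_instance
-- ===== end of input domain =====

-- B replaces A's full reverse sort + two stride-2 slice sums by a dictionary of counts and a
-- parity walk over the distinct residues in descending order (even-count buckets cancel);
-- A's in-place sort touches only a local list, so there is no observable mutation difference.

-- ===== PORT A =====
-- the first pass shared by both programs verbatim: all contiguous-subarray products mod m,
-- in A's emission order
def pvScores (n : Int) (sequence : List Int) (m : Int) : List Int :=
  (PySem.List.pyRange 0 n 1).foldl (fun scores i =>
    let num := PySem.Int.mod (PySem.List.pyGetD sequence i 0) m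
    let scores := scores ++ [num]
    ((PySem.List.pyRange (i + 1) n 1).foldl (fun (st : Int × List Int) j =>
        let num' := PySem.Int.mod (st.1 * PySem.List.pyGetD sequence j 0) m
        (num', st.2 ++ [num'])) (num, scores)).2) []

def solution (n : Int) (sequence : List Int) (m : Int) : Int :=
  let scores := pvScores n sequence m
  let scores := PySem.List.sorted scores (fun x => x) true
  ((PySem.List.slice? scores (some 0) none 2).getD []).sum -
    ((PySem.List.slice? scores (some 1) none 2).getD []).sum

-- ===== PORT B =====
def solution_alt (n : Int) (sequence : List Int) (m : Int) : Int :=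
  let scores := pvScores n sequence m
  let counts := scores.foldl (fun (d : PySem.Dict Int Int) v => d.insert v (d.getD v 0 + 1)) PySem.Dict.empty
  ((PySem.List.sorted (PySem.Dict.keys counts) (fun x => x) true).foldl
    (fun (st : Int × Bool) v =>
      if PySem.Int.mod (counts.getD v 0) 2 = 1 then
        (st.1 + (if st.2 then -v else v), !st.2)
      else st) (0, false)).1

-- ===== PRECONDITION & SPEC =====
-- Exactly where Python A returns: when 0 < n, m = 0 raises ZeroDivisionError and
-- n > len(sequence) raises IndexError on sequence[i]; when n ≤ 0 the loop body never runs
-- and A returns 0 for any m and sequence.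
def Pre_solution (n : Int) (sequence : List Int) (m : Int) : Prop :=
  n ≤ 0 ∨ (m ≠ 0 ∧ n ≤ (sequence.length : Int))
instance (n : Int) (sequence : List Int) (m : Int) : Decidable (Pre_solution n sequence m) := by unfold Pre_solution; infer_instance
def pvWitness_solution : Int × List Int × Int := (3, [4, -1, 7], 5)

def Spec_solution (n : Int) (sequence : List Int) (m : Int) (out : Int) : Prop := out = solution_alt n sequence m
instance (n : Int) (sequence : List Int) (m : Int) (out : Int) : Decidable (Spec_solution n sequence m out) := by unfold Spec_solution; infer_instance

-- ===== CLAIM (what is proved, stated in full; the proofs are below) =====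
def Claim_equal_solution : Prop := ∀ (n : Int) (sequence : List Int) (m : Int), Dom_solution n sequence m → Pre_solution n sequence m → Spec_solution n sequence m (solution n sequence m)

-- ===== LEMMAS AND PROOFS =====

-- alternating sum x0 - x1 + x2 - …
def pvAlt : List Int → Int
  | [] => 0
  | x :: l => x - pvAlt l

-- l[0::2] and l[1::2] as structural recursions
def pvEvens : List Int → List Int
  | [] => []
  | [x] => [x]
  | x :: _ :: l => x :: pvEvens l

def pvOdds : List Int → List Int
  | [] => []
  | _ :: l => pvEvens l

lemma pvEvens_filterMap : ∀ xs : List Int,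
    List.filterMap (fun k : Nat => xs[2 * k]?) (List.range ((xs.length + 1) / 2)) = pvEvens xs := by
  intro xs
  induction xs using pvEvens.induct with
  | case1 => simp [pvEvens]
  | case2 x => simp [pvEvens]
  | case3 x y l ih =>
    have hlen : ((x :: y :: l).length + 1) / 2 = (l.length + 1) / 2 + 1 := by
      simp [List.length_cons]; omega
    rw [hlen, List.range_succ_eq_map, List.filterMap_cons, List.filterMap_map]
    have h0 : (x :: y :: l)[2 * 0]? = some x := by simp
    rw [h0]
    have hsucc : (fun k : Nat => (x :: y :: l)[2 * k]?) ∘ Nat.succ = fun k : Nat => l[2 * k]? := by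
      funext k
      show (x :: y :: l)[2 * (k + 1)]? = l[2 * k]?
      rw [show 2 * (k + 1) = 2 * k + 1 + 1 from by ring]
      simp
    rw [hsucc, ih, pvEvens]

lemma pvSlice0 (xs : List Int) : PySem.List.slice? xs (some 0) none 2 = some (pvEvens xs) := by
  simp only [PySem.List.slice?, PySem.List.sliceIndices]
  norm_num
  rw [← pvEvens_filterMap xs]
  congr 1
  · rcases Nat.eq_zero_or_pos xs.length with h | h
    · simp [h]
    · simp [h]
      rw [show ((xs.length : Int) + 2 - 1) = ((xs.length + 1 : Nat) : Int) from by push_cast; ring]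
      norm_cast

lemma pvSlice1 (xs : List Int) : PySem.List.slice? xs (some 1) none 2 = some (pvOdds xs) := by
  simp only [PySem.List.slice?, PySem.List.sliceIndices]
  norm_num
  rcases xs with _ | ⟨x, l⟩
  · simp [pvOdds]
  rcases l with _ | ⟨y, t⟩
  · norm_num [pvOdds, pvEvens]
  have h1 : (1:Nat) < (x :: y :: t).length := by simp
  rw [if_pos h1]
  have e1 : ((((x :: y :: t).length : Int)) - min 1 ((x :: y :: t).length : Int) + 2 - 1) = (((y :: t).length + 1 : Nat) : Int) := by
    simp [List.length_cons]; omega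
  rw [e1]
  have e2 : (((((y :: t).length + 1 : Nat) : Int)) / 2).toNat = ((y :: t).length + 1) / 2 := by
    norm_cast
  rw [e2, pvOdds, ← pvEvens_filterMap (y :: t)]
  show _ = List.filterMap (fun k : Nat => (y :: t)[2 * k]?) _
  apply List.filterMap_congr
  intro k _
  have e3 : (min 1 ((x :: y :: t).length : Int) + 2 * (k : Int)).toNat = 2 * k + 1 := by
    simp [List.length_cons]; omega
  rw [e3]
  simp

lemma pvAlt_eq (xs : List Int) : (pvEvens xs).sum - (pvOdds xs).sum = pvAlt xs := by
  induction xs using pvEvens.induct with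
  | case1 => simp [pvEvens, pvOdds, pvAlt]
  | case2 x => simp [pvEvens, pvOdds, pvAlt]
  | case3 x y l ih =>
    simp only [pvEvens, pvOdds, pvAlt, List.sum_cons]
    have hE : pvEvens (y :: l) = y :: pvOdds l := by
      rcases l with _ | ⟨z, t⟩ <;> rfl
    rw [hE, List.sum_cons]
    omega

def pvExpand (c : Int → Nat) (ks : List Int) : List Int :=
  ks.flatMap (fun v => List.replicate (c v) v)

lemma pvAlt_replicate_append (v : Int) (c : Nat) (r : List Int) :
    pvAlt (List.replicate c v ++ r) = if c % 2 = 1 then v - pvAlt r else pvAlt r := by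
  induction c with
  | zero => simp
  | succ k ih =>
    rw [List.replicate_succ, List.cons_append, pvAlt, ih]
    rcases Nat.mod_two_eq_zero_or_one k with h | h
    · have h1 : k % 2 ≠ 1 := by omega
      have h2 : (k + 1) % 2 = 1 := by omega
      simp [h1, h2]
    · have h2 : (k + 1) % 2 ≠ 1 := by omega
      simp [h, h2]

lemma pvFold_alt (c : Int → Nat) (ks : List Int) (a : Int) (flip : Bool) :
    (ks.foldl (fun (st : Int × Bool) v =>
        if (c v) % 2 = 1 then (st.1 + (if st.2 then -v else v), !st.2) else st) (a, flip)).1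
      = a + (if flip then -1 else 1) * pvAlt (pvExpand c ks) := by
  induction ks generalizing a flip with
  | nil => simp [pvExpand, pvAlt]
  | cons v ks ih =>
    rw [pvExpand, List.flatMap_cons, ← pvExpand, pvAlt_replicate_append, List.foldl_cons]
    by_cases h : c v % 2 = 1
    · rw [if_pos h, if_pos h, ih]
      cases flip <;> simp <;> ring
    · rw [if_neg h, if_neg h, ih]

lemma pvCount_expand (xs : List Int) (w : Int) :
    ∀ (D : List Int), D.Nodup →
      (pvExpand (fun v => xs.count v) D).count w = if w ∈ D then xs.count w else 0 := by
  intro D hD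
  induction D with
  | nil => simp [pvExpand]
  | cons v D ih =>
    have hv : v ∉ D := (List.nodup_cons.mp hD).1
    have hD' : D.Nodup := (List.nodup_cons.mp hD).2
    rw [pvExpand, List.flatMap_cons, ← pvExpand, List.count_append, ih hD', List.count_replicate]
    by_cases hw : w = v
    · subst hw
      simp [hv]
    · simp [hw, Ne.symm hw]

lemma pvPerm_expand (xs : List Int) (D : List Int) (hD : D.Nodup)
    (hmem : ∀ w, w ∈ D ↔ w ∈ xs) :
    xs.Perm (pvExpand (fun v => xs.count v) D) := by
  rw [List.perm_iff_count]
  intro w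
  rw [pvCount_expand xs w D hD]
  by_cases h : w ∈ D
  · simp [h]
  · have : w ∉ xs := fun hx => h ((hmem w).mpr hx)
    simp [h, List.count_eq_zero_of_not_mem this]

lemma pvPairwise_expand (c : Int → Nat) (D : List Int)
    (hD : D.Pairwise (fun a b => b < a)) :
    (pvExpand c D).Pairwise (fun a b => b ≤ a) := by
  induction D with
  | nil => simp [pvExpand]
  | cons v D ih =>
    rw [pvExpand, List.flatMap_cons, ← pvExpand]
    rw [List.pairwise_cons] at hD
    apply List.pairwise_append.mpr
    refine ⟨?_, ih hD.2, ?_⟩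
    · exact List.pairwise_replicate.mpr (Or.inr le_rfl)
    · intro a ha b hb
      have hav : a = v := (List.eq_of_mem_replicate ha)
      have : ∃ u ∈ D, b ∈ List.replicate (c u) u := List.mem_flatMap.mp hb
      rcases this with ⟨u, hu, hbu⟩
      have hbv : b = u := List.eq_of_mem_replicate hbu
      subst hav
      rw [hbv]
      exact le_of_lt (hD.1 _ hu)

lemma pvSorted_expand (xs : List Int) :
    PySem.List.sorted xs (fun x => x) true
      = pvExpand (fun v => xs.count v) (PySem.List.sorted (PySem.Set.ofList xs) (fun x => x) true) := by
  set D := PySem.List.sorted (PySem.Set.ofList xs) (fun x => x) true with hDdef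
  have hDperm : D.Perm (PySem.Set.ofList xs) := PySem.List.sorted_perm _ _ _
  have hDnodup : D.Nodup := hDperm.nodup_iff.mpr (PySem.Set.nodup_ofList xs)
  have hDmem : ∀ w, w ∈ D ↔ w ∈ xs := by
    intro w
    rw [hDperm.mem_iff]
    simp [PySem.Set.mem_ofList]
  have hDdesc : D.Pairwise (fun a b => b < a) := by
    have h1 : D.Pairwise (fun a b : Int => b ≤ a) := PySem.List.sorted_pairwise_rev _ _
    have h2 : D.Pairwise (fun a b : Int => a ≠ b) := hDnodup
    exact (h1.and h2).imp (fun h => lt_of_le_of_ne h.1 (Ne.symm h.2))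
  apply PySem.List.eq_of_perm_of_pairwise_le_of_injective (key := fun v : Int => -v) neg_injective
  · exact (PySem.List.sorted_perm _ _ _).trans (pvPerm_expand xs D hDnodup hDmem)
  · exact (PySem.List.sorted_pairwise_rev _ _).imp (fun h => neg_le_neg h)
  · exact (pvPairwise_expand _ D hDdesc).imp (fun h => neg_le_neg h)

lemma pvMain (xs : List Int) :
    ((PySem.List.slice? (PySem.List.sorted xs (fun x => x) true) (some 0) none 2).getD []).sum -
      ((PySem.List.slice? (PySem.List.sorted xs (fun x => x) true) (some 1) none 2).getD []).sum
    = ((PySem.List.sorted (PySem.Set.ofList xs) (fun x => x) true).foldl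
        (fun (st : Int × Bool) v =>
          if (xs.count v) % 2 = 1 then (st.1 + (if st.2 then -v else v), !st.2) else st) (0, false)).1 := by
  rw [pvSlice0, pvSlice1]
  simp only [Option.getD_some]
  rw [pvAlt_eq, pvSorted_expand, pvFold_alt (fun v => xs.count v)]
  simp

-- ===== VERDICT (by name: the statement is the Claim_ definition above) =====
theorem solution_spec : Claim_equal_solution := by
  intro n sequence m _ _
  unfold Spec_solution solution solution_alt
  simp only []
  generalize pvScores n sequence m = xs
  rw [PySem.Dict.foldl_insert_getD_add_one_eq_counter]
  rw [PySem.Dict.keys_counter]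
  have hc : ∀ v : Int, (PySem.Dict.counter xs).getD v 0 = (xs.count v : Int) :=
    fun v => PySem.Dict.getD_counter xs v
  calc _ = ((PySem.List.sorted (PySem.Set.ofList xs) (fun x => x) true).foldl
        (fun (st : Int × Bool) v =>
          if (xs.count v) % 2 = 1 then (st.1 + (if st.2 then -v else v), !st.2) else st) (0, false)).1 := pvMain xs
    _ = _ := by
          congr 1
          apply PySem.List.foldl_congr_mem
          intro st v hv
          have hm : PySem.Int.mod ((PySem.Dict.counter xs).getD v 0) 2 = ((xs.count v % 2 : Nat) : Int) := by
            rw [hc v]; exact_mod_cast PySem.Int.mod_natCast (xs.count v) 2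
          rw [hm]
          split_ifs with h1 h2 h2 <;> first | rfl | (exfalso; omega)
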